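-- pv_equiv track=rewrite | github.com/pcw109550/write-up | 2020/CryptoCTF/Fatima/solve.py | circulant
-- ===== SOURCE A (Python) =====
-- def circulant(v):
--     C, n = [], len(v)
--     for i in range(n):
--         C.append(v)
--         tmp = []
--         tmp.append(v[-1])
--         tmp.extend(v[:-1])
--         v = tmp
--     return C
-- ===== SOURCE B (Python) =====
-- def circulant(v):
--     n = len(v)
--     return [[v[(j - i) % n] for j in range(n)] for i in range(n)]
-- ===== Notes on version B (the rewrite author's own statement) =====
-- stated objective: simpler
-- what changed: Each row is computed independently by closed-form modular indexing into the original vector instead of threading a rotating running copy through the loop.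
import Mathlib
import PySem

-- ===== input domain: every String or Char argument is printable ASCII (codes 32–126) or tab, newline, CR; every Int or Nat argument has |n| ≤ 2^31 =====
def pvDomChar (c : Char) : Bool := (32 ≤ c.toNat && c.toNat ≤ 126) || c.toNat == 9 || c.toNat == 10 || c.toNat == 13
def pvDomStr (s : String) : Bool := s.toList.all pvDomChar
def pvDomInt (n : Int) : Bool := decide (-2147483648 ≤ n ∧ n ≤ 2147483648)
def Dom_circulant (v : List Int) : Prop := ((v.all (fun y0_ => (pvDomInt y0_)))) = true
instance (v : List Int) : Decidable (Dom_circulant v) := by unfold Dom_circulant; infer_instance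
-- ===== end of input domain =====

-- B differs from A by computing each row independently via closed-form modular indexing
-- into the original vector (simpler decomposition) instead of threading a rotating copy.

-- ===== PORT A =====
-- one loop iteration: C.append(v); tmp = [v[-1]] + v[:-1]; v = tmp
def circStep (st : List (List Int) × List Int) (_ : Nat) : List (List Int) × List Int :=
  (st.1 ++ [st.2],
   ((PySem.List.pyGet? st.2 (-1)).getD 0) :: PySem.List.slice st.2 none (some (-1)))

def circulant (v : List Int) : List (List Int) :=
  ((List.range v.length).foldl circStep ([], v)).1

-- ===== PORT B =====
def circulant_alt (v : List Int) : List (List Int) :=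
  (List.range v.length).map (fun (i : Nat) =>
    (List.range v.length).map (fun (j : Nat) =>
      PySem.List.pyGetD v (PySem.Int.mod ((j : Int) - (i : Int)) (v.length : Int)) 0))

-- ===== PRECONDITION & SPEC =====
def Spec_circulant (v : List Int) (out : List (List Int)) : Prop := out = circulant_alt v
instance (v : List Int) (out : List (List Int)) : Decidable (Spec_circulant v out) := by unfold Spec_circulant; infer_instance

-- ===== CLAIM (what is proved, stated in full; the proofs are below) =====
def Claim_equal_circulant : Prop := ∀ (v : List Int), Dom_circulant v → Spec_circulant v (circulant v)

-- ===== LEMMAS AND PROOFS =====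

-- rotate right once, exactly as A's loop body builds tmp
def rotR (w : List Int) : List Int :=
  ((PySem.List.pyGet? w (-1)).getD 0) :: PySem.List.slice w none (some (-1))

def rotIter : Nat → List Int → List Int
  | 0, w => w
  | (i+1), w => rotR (rotIter i w)

-- row i of B's result
def row (v : List Int) (i : Nat) : List Int :=
  (List.range v.length).map (fun (j : Nat) =>
    PySem.List.pyGetD v (PySem.Int.mod ((j : Int) - (i : Int)) (v.length : Int)) 0)

lemma loop_unroll (m : Nat) (C₀ : List (List Int)) (w : List Int) :
    (List.range m).foldl circStep (C₀, w)
      = (C₀ ++ (List.range m).map (fun i => rotIter i w), rotIter m w) := by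
  induction m with
  | zero => simp [rotIter]
  | succ m ih =>
      rw [List.range_succ, List.foldl_append, ih]
      simp [circStep, rotIter, rotR]

lemma pyGetD_small (v : List Int) (k : Nat) (hk : k < v.length) :
    PySem.List.pyGetD v (k : Int) 0 = v[k] := by
  have := PySem.List.pyGetD_natCast v k (0 : Int)
  rw [this, List.getD_eq_getElem _ _ hk]

lemma row_zero (v : List Int) : row v 0 = v := by
  apply List.ext_getElem
  · simp [row]
  · intro k hk hk'
    simp only [row, List.getElem_map, List.getElem_range]
    have hkl : k < v.length := by simpa [row] using hk
    have hmod : PySem.Int.mod ((k : Int) - (0 : Nat)) (v.length : Int) = (k : Int) := by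
      rw [PySem.Int.mod_eq_emod_of_pos (by omega)]
      simp
      exact Int.emod_eq_of_lt (by positivity) (by exact_mod_cast hkl)
    rw [hmod, pyGetD_small v k hkl]

lemma row_succ (v : List Int) (hv : v ≠ []) (i : Nat) :
    rotR (row v i) = row v (i + 1) := by
  have hn : 0 < v.length := List.length_pos_iff.mpr hv
  set n : Nat := v.length with hnn
  have hrow_ne : row v i ≠ [] := by
    simp [row, List.range_eq_nil]
    omega
  -- the function producing entries of row i
  set f : Nat → Nat → Int := fun i j =>
    PySem.List.pyGetD v (PySem.Int.mod ((j : Int) - (i : Int)) (n : Int)) 0 with hf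
  have hmodeq : ∀ a b : Int, (n : Int) ∣ (a - b) →
      PySem.Int.mod a (n : Int) = PySem.Int.mod b (n : Int) := by
    intro a b hdvd
    rw [PySem.Int.mod_eq_emod_of_pos (by exact_mod_cast hn),
        PySem.Int.mod_eq_emod_of_pos (by exact_mod_cast hn)]
    exact Int.emod_eq_emod_iff_emod_sub_eq_zero.mpr ((Int.emod_eq_zero_of_dvd hdvd))
  -- last element of row i equals first element of row (i+1)
  have hwrap : f i (n - 1) = f (i+1) 0 := by
    simp only [hf]
    congr 1
    apply hmodeq
    have : ((n - 1 : Nat) : Int) - (i : Int) - (((0:Nat) : Int) - ((i+1 : Nat) : Int)) = (n : Int) := by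
      rw [Nat.cast_sub hn]
      push_cast
      ring
    rw [this]
  have hshift : ∀ j : Nat, f i j = f (i+1) (j+1) := by
    intro j
    simp only [hf]
    congr 2
    push_cast
    ring
  -- row i as a map, its last and dropLast
  have hrow : ∀ k, row v k = (List.range n).map (f k) := fun k => rfl
  have hlast : (PySem.List.pyGet? (row v i) (-1)).getD 0 = f i (n - 1) := by
    rw [PySem.List.pyGet?_neg_one]
    · rw [hrow]
      rw [List.getLast?_eq_getElem?]
      simp [Nat.sub_lt hn Nat.one_pos]
  have hdrop : PySem.List.slice (row v i) none (some (-1)) = (List.range (n-1)).map (f i) := by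
    rw [PySem.List.slice_to_neg_one, hrow]
    rw [← List.map_dropLast]
    congr 1
    have : List.range n = List.range (n-1) ++ [n-1] := by
      conv_lhs => rw [show n = (n-1) + 1 by omega]
      exact List.range_succ
    rw [this, List.dropLast_concat]
  have hnext : row v (i+1) = f (i+1) 0 :: (List.range (n-1)).map (fun j => f (i+1) (j+1)) := by
    rw [hrow]
    conv_lhs => rw [show n = (n-1) + 1 by omega]
    rw [List.range_succ_eq_map]
    simp [Function.comp_def]
  rw [rotR, hlast, hdrop, hnext, hwrap]
  congr 1
  exact List.map_congr_left (fun j _ => hshift j)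

lemma rotIter_eq_row (v : List Int) (hv : v ≠ []) (i : Nat) :
    rotIter i v = row v i := by
  induction i with
  | zero => simp [rotIter, row_zero]
  | succ i ih => rw [rotIter, ih, row_succ v hv i]

-- ===== VERDICT (by name: the statement is the Claim_ definition above) =====
theorem circulant_spec : Claim_equal_circulant := by
  intro v _
  unfold Spec_circulant
  rcases eq_or_ne v [] with h | h
  · subst h; rfl
  · show circulant v = circulant_alt v
    rw [circulant, loop_unroll]
    show (List.range v.length).map (fun i => rotIter i v) = circulant_alt v
    rw [circulant_alt]
    exact List.map_congr_left (fun i _ => rotIter_eq_row v h i)
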